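-- pv_equiv track=rewrite | github.com/tallon-research/RNA-Seq-Alignment-Benchmark-for-Arabidopsis | RNA-Seq-Alignment-Benchmark-for-Arabidopsis/snp_introducer.py | cigarUnroller
-- ===== SOURCE A (Python) =====
-- def cigarUnroller(cigarString):
--     try:
--         curNum = ''
--         curLet = ''
--         cigar = ''
--         for char in cigarString:
--             if char.isdigit() == True:
--                 curNum += char
--             else:
--                 curLet = char
--                 cigar += (curLet * int(curNum))
--                 curNum = ''
--         return cigar
--     except:
--         return ''
-- ===== SOURCE B (Python) =====
-- def cigarUnroller(cigarString):
--     # Two-pointer scan over indices: take the maximal digit run, then the letter.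
--     out = []
--     i = 0
--     n = len(cigarString)
--     while i < n:
--         j = i
--         while j < n and cigarString[j].isdigit():
--             j += 1
--         if j == n:          # trailing bare number: dropped
--             break
--         if j == i:          # letter with no preceding count: whole result is ''
--             return ''
--         out.append(cigarString[j] * int(cigarString[i:j]))
--         i = j + 1
--     return ''.join(out)
-- ===== Notes on version B (the rewrite author's own statement) =====
-- stated objective: alternative
-- what changed: Replaces A's char-by-char state machine (accumulate digit chars, multiply on each letter, try/except for the empty-count case) with a two-pointer scan that takes each maximal digit run and its following letter, expands slice-by-slice into a list joined at the end, and returns the empty string explicitly when a letter has no preceding count.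
import Mathlib
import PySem

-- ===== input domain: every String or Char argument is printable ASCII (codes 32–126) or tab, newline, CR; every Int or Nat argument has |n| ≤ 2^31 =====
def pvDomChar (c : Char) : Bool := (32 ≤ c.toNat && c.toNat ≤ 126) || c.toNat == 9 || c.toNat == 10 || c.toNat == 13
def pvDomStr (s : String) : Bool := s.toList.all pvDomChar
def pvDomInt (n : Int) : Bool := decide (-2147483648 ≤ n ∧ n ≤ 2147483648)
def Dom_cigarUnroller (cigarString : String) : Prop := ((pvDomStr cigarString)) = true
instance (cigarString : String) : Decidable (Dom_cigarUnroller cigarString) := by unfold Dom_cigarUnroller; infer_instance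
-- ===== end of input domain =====

-- B replaces A's char-by-char digit accumulation with a two-pointer scan (maximal digit run,
-- then letter, expand) — a different decomposition of the same task; no speed claim.

-- ===== PORT A =====
-- A's for-loop over the characters, state (curNum, cigar); A's bare `except` catches exactly
-- int('') (ofChars? [] = none), modelled by the Option result.
def pvA_loop : List Char → List Char → List Char → Option (List Char)
  | [], _curNum, cigar => some cigar
  | char :: rest, curNum, cigar =>
    if PySem.Chars.isdigit char then
      pvA_loop rest (curNum ++ [char]) cigar
    else
      match PySem.Int.ofChars? curNum with
      | some n => pvA_loop rest [] (cigar ++ PySem.List.pyRepeat [char] n)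
      | none => none

def cigarUnroller (cigarString : String) : String :=
  match pvA_loop cigarString.toList [] [] with
  | some cigar => String.ofList cigar
  | none => ""

-- ===== PORT B =====
-- inner `while j < n and cigarString[j].isdigit()`: the maximal digit run and the remainder
def pvB_digitRun : List Char → List Char × List Char
  | [] => ([], [])
  | c :: rest =>
    if PySem.Chars.isdigit c then
      let p := pvB_digitRun rest
      (c :: p.1, p.2)
    else ([], c :: rest)

theorem pvB_digitRun_snd_le (l : List Char) : (pvB_digitRun l).2.length ≤ l.length := by
  induction l with
  | nil => simp [pvB_digitRun]
  | cons c rest ih =>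
    simp only [pvB_digitRun]
    split
    · simpa using Nat.le_succ_of_le ih
    · simp

-- outer while loop of B: digit run `num`, then the letter, out.append(letter * int(num));
-- int() is called only on a nonempty digit run, so it cannot fail in Python — the `none`
-- branch is unreachable there and returns the function's '' result shape.
def pvB_loop (l : List Char) (out : List (List Char)) : List (List Char) :=
  let num := (pvB_digitRun l).1
  let rest := (pvB_digitRun l).2
  if hr : rest = [] then out            -- j == n: trailing bare number dropped ("break")
  else if num = [] then []              -- j == i: letter without count → return ''
  else
    match PySem.Int.ofChars? num with   -- int(s[i:j]) on a nonempty digit run: never fails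
    | some n => pvB_loop rest.tail (out ++ [PySem.List.pyRepeat [rest.head hr] n])
    | none => []
termination_by l.length
decreasing_by
  have h := pvB_digitRun_snd_le l
  cases hx : (pvB_digitRun l).2 with
  | nil => exact absurd hx hr
  | cons a b => rw [hx] at h; simp at h ⊢; omega

def cigarUnroller_alt (cigarString : String) : String :=
  String.ofList (PySem.Chars.join [] (pvB_loop cigarString.toList []))

-- ===== PRECONDITION & SPEC =====
def Spec_cigarUnroller (cigarString : String) (out : String) : Prop := out = cigarUnroller_alt cigarString
instance (cigarString : String) (out : String) : Decidable (Spec_cigarUnroller cigarString out) := by unfold Spec_cigarUnroller; infer_instance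

-- ===== CLAIM (what is proved, stated in full; the proofs are below) =====
def Claim_equal_cigarUnroller : Prop := ∀ (cigarString : String), Dom_cigarUnroller cigarString → Spec_cigarUnroller cigarString (cigarUnroller cigarString)

-- ===== LEMMAS AND PROOFS =====

theorem joinNil_eq_flatten (xs : List (List Char)) : PySem.Chars.join [] xs = xs.flatten := by
  induction xs with
  | nil => simp [PySem.Chars.join_nil]
  | cons p rest ih =>
    cases rest with
    | nil => simp [PySem.Chars.join_singleton]
    | cons q r => rw [PySem.Chars.join_cons_cons]; simp_all

theorem digitRun_all_digits (num : List Char) (h : ∀ c ∈ num, PySem.Chars.isdigit c = true) :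
    pvB_digitRun num = (num, []) := by
  induction num with
  | nil => simp [pvB_digitRun]
  | cons c rest ih =>
    have hc : PySem.Chars.isdigit c = true := h c (by simp)
    have := ih (fun x hx => h x (by simp [hx]))
    simp [pvB_digitRun, hc, this]

theorem digitRun_append (num : List Char) (c : Char) (r : List Char)
    (h : ∀ x ∈ num, PySem.Chars.isdigit x = true) (hc : PySem.Chars.isdigit c = false) :
    pvB_digitRun (num ++ c :: r) = (num, c :: r) := by
  induction num with
  | nil => simp [pvB_digitRun, hc]
  | cons d rest ih =>
    have hd : PySem.Chars.isdigit d = true := h d (by simp)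
    have := ih (fun x hx => h x (by simp [hx]))
    simp [pvB_digitRun, hd, this]

-- the invariant tying A's running state (curNum, cigar) to B's position in the string
theorem key_lemma (k : Nat) : ∀ (l num : List Char) (out : List (List Char)),
    l.length ≤ k → (∀ c ∈ num, PySem.Chars.isdigit c = true) →
    (match pvA_loop l num (PySem.Chars.join [] out) with
     | some cs => cs
     | none => []) = PySem.Chars.join [] (pvB_loop (num ++ l) out) := by
  induction k with
  | zero =>
    intro l num out hl hnum
    have : l = [] := List.length_eq_zero_iff.mp (Nat.le_zero.mp hl)
    subst this
    rw [pvB_loop]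
    simp only [List.append_nil, digitRun_all_digits num hnum]
    rfl
  | succ k ih =>
    intro l num out hl hnum
    cases l with
    | nil =>
      rw [pvB_loop]
      simp only [List.append_nil, digitRun_all_digits num hnum]
      rfl
    | cons c rest =>
      by_cases hc : PySem.Chars.isdigit c = true
      · have h1 : pvA_loop (c :: rest) num (PySem.Chars.join [] out)
            = pvA_loop rest (num ++ [c]) (PySem.Chars.join [] out) := by
          simp [pvA_loop, hc]
        rw [h1]
        have hnum' : ∀ x ∈ num ++ [c], PySem.Chars.isdigit x = true := by
          intro x hx
          rcases List.mem_append.mp hx with h | h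
          · exact hnum x h
          · simp at h; subst h; exact hc
        have := ih rest (num ++ [c]) out (by simpa using Nat.le_of_succ_le_succ hl) hnum'
        rw [this, List.append_assoc]
        rfl
      · have hc' : PySem.Chars.isdigit c = false := by simpa using hc
        rw [pvB_loop]
        have hrun := digitRun_append num c rest hnum hc'
        simp only [hrun]
        by_cases hne : num = []
        · -- curNum = '': int('') raises in A; B returns '' at j == i
          subst hne
          have h0 : PySem.Int.ofChars? [] = none := by decide
          simp [pvA_loop, hc', h0]
        · simp only [if_neg hne, List.head_cons, List.tail_cons]
          cases hint : PySem.Int.ofChars? num with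
          | none =>
            simp [pvA_loop, hc', hint, PySem.Chars.join_nil]
          | some n =>
            have h1 : pvA_loop (c :: rest) num (PySem.Chars.join [] out)
                = pvA_loop rest [] (PySem.Chars.join [] out ++ PySem.List.pyRepeat [c] n) := by
              simp [pvA_loop, hc', hint]
            have hjoin : PySem.Chars.join [] out ++ PySem.List.pyRepeat [c] n
                = PySem.Chars.join [] (out ++ [PySem.List.pyRepeat [c] n]) := by
              simp [joinNil_eq_flatten]
            rw [h1, hjoin]
            exact ih rest [] (out ++ [PySem.List.pyRepeat [c] n])
              (by simpa using Nat.le_of_succ_le_succ hl) (by simp)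

-- ===== VERDICT (by name: the statement is the Claim_ definition above) =====
theorem cigarUnroller_spec : Claim_equal_cigarUnroller := by
  intro s _
  unfold Spec_cigarUnroller cigarUnroller cigarUnroller_alt
  have key := key_lemma s.toList.length s.toList [] [] (le_refl _) (by simp)
  simp only [PySem.Chars.join_nil, List.nil_append] at key
  rw [← key]
  cases h : pvA_loop s.toList [] [] with
  | none => simp [h]
  | some cs => simp [h]
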